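-- pv_equiv track=rewrite | github.com/rnwind/bert-ner | src/ner_model.py | _shift_entities
-- ===== SOURCE A (Python) =====
-- def _shift_entities(spans: list, entities: list) -> list:
--     new_entities = [x[:] for x in entities]
--     for span in spans:
--         for i, ent in enumerate(entities):
--             span_len = span[1] - span[0]
--             if span[1] <= ent[0]:
--                 new_entities[i][0] -= span_len - 1
--             if span[1] <= ent[1]:
--                 new_entities[i][1] -= span_len - 1
--     return new_entities
-- ===== SOURCE B (Python) =====
-- def _shift_entities(spans: list, entities: list) -> list:
--     # sort span (end, length-1) pairs by end, prefix-sum the adjustments,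
--     # then binary-search the threshold for each entity coordinate
--     pairs = sorted(((s[1], s[1] - s[0] - 1) for s in spans), key=lambda p: p[0])
--     ends = [p[0] for p in pairs]
--     pref = [0]
--     t = 0
--     for _, d in pairs:
--         t += d
--         pref.append(t)
--
--     def total(c):
--         lo, hi = 0, len(ends)
--         while lo < hi:
--             mid = (lo + hi) // 2
--             if ends[mid] <= c:
--                 lo = mid + 1
--             else:
--                 hi = mid
--         return pref[lo]
--
--     return [[e[0] - total(e[0]), e[1] - total(e[1])] + e[2:] for e in entities]
-- ===== Notes on version B (the rewrite author's own statement) =====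
-- stated objective: faster
-- what changed: replaces A's nested span-by-entity loop with sort-spans-by-end + prefix sums of the adjustments + a binary search per entity coordinate
-- outside the precondition, e.g. on _shift_entities([], [[5]]): A returns [[5]], B raises IndexError; on _shift_entities([[1]], []): A returns [], B raises IndexError
import Mathlib
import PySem

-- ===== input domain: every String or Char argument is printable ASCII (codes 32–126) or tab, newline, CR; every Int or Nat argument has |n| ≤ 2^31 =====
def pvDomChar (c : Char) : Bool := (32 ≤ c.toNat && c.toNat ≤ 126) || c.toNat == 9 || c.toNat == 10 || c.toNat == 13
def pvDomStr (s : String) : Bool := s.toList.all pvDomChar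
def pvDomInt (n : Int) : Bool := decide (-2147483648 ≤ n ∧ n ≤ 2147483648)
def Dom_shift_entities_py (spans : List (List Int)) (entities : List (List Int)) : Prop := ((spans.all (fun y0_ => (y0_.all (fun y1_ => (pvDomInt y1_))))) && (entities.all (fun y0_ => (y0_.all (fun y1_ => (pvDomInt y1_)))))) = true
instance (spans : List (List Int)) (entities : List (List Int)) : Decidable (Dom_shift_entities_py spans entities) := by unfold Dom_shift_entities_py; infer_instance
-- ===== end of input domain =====

-- B replaces A's nested span×entity loop by sorting spans by end, prefix-summing the
-- adjustments, and binary-searching the threshold per entity coordinate.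

-- ===== PORT A =====
-- one iteration of A's inner loop body: the two conditional in-place updates of new_entities[i]
-- (indices 0/1 of span and of the rows are in range under Pre_; out of range Python raises,
--  pyGetD/getD/set are total stand-ins there)
def pvAStep (span : List Int) (st : List (List Int)) (p : Int × List Int) : List (List Int) :=
  let i := p.1.toNat
  let ent := p.2
  let span_len := PySem.List.pyGetD span 1 0 - PySem.List.pyGetD span 0 0
  let st1 :=
    if PySem.List.pyGetD span 1 0 ≤ PySem.List.pyGetD ent 0 0 then
      st.set i ((st.getD i []).set 0 ((st.getD i []).getD 0 0 - (span_len - 1)))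
    else st
  if PySem.List.pyGetD span 1 0 ≤ PySem.List.pyGetD ent 1 0 then
    st1.set i ((st1.getD i []).set 1 ((st1.getD i []).getD 1 0 - (span_len - 1)))
  else st1

def shift_entities_py (spans : List (List Int)) (entities : List (List Int)) : List (List Int) :=
  spans.foldl (fun st span => (PySem.List.enumerate entities 0).foldl (pvAStep span) st)
    (entities.map (fun x => x))

-- ===== PORT B =====
-- Source B's hand-written 'while lo < hi' binary search (first index with ends[index] > c);
-- the fuel argument only bounds the iteration count to make the loop structural (fuel = hi
-- suffices since hi - lo shrinks each turn); it never alters the computed value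
def pvBSearch (ends : List Int) (c : Int) : Nat → Nat → Nat → Nat
  | 0, lo, _ => lo
  | fuel + 1, lo, hi =>
    if lo < hi then
      let mid := (lo + hi) / 2
      if PySem.List.pyGetD ends (mid : Int) 0 ≤ c then pvBSearch ends c fuel (mid + 1) hi
      else pvBSearch ends c fuel lo mid
    else lo

-- Source B's total(c) = pref[lo] after the search
def pvTotal (ends : List Int) (pref : List Int) (c : Int) : Int :=
  PySem.List.pyGetD pref ((pvBSearch ends c ends.length 0 ends.length : Nat) : Int) 0

def shift_entities_py_alt (spans : List (List Int)) (entities : List (List Int)) : List (List Int) :=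
  let pairs := PySem.List.sorted
    (spans.map (fun s => (PySem.List.pyGetD s 1 0,
                          PySem.List.pyGetD s 1 0 - PySem.List.pyGetD s 0 0 - 1)))
    (fun p => p.1) false
  let ends := pairs.map (fun p => p.1)
  -- the 'pref'/'t' accumulation loop of Source B, state (pref, t)
  let pp := pairs.foldl (fun (st : List Int × Int) p => (st.1 ++ [st.2 + p.2], st.2 + p.2)) ([0], 0)
  let pref := pp.1
  entities.map (fun e =>
    [PySem.List.pyGetD e 0 0 - pvTotal ends pref (PySem.List.pyGetD e 0 0),
     PySem.List.pyGetD e 1 0 - pvTotal ends pref (PySem.List.pyGetD e 1 0)]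
    ++ PySem.List.slice e (some 2) none)

-- ===== PRECONDITION & SPEC =====
-- Pre_ requires every span row and every entity row to have at least 2 elements. This also
-- excludes inputs where one of the lists is empty and the other contains a short row: there A's
-- loops never touch the short row and A returns, while B reads s[1]/e[1] up front and raises
-- IndexError (see claim cites).
def Pre_shift_entities_py (spans : List (List Int)) (entities : List (List Int)) : Prop :=
  (∀ s ∈ spans, 2 ≤ s.length) ∧ (∀ e ∈ entities, 2 ≤ e.length)
instance (spans : List (List Int)) (entities : List (List Int)) : Decidable (Pre_shift_entities_py spans entities) := by unfold Pre_shift_entities_py; infer_instance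

def pvWitness_shift_entities_py : List (List Int) × List (List Int) := ([[0, 2]], [[3, 5]])

def Spec_shift_entities_py (spans : List (List Int)) (entities : List (List Int)) (out : List (List Int)) : Prop := out = shift_entities_py_alt spans entities
instance (spans : List (List Int)) (entities : List (List Int)) (out : List (List Int)) : Decidable (Spec_shift_entities_py spans entities out) := by unfold Spec_shift_entities_py; infer_instance

-- ===== CLAIM (what is proved, stated in full; the proofs are below) =====
def Claim_equal_shift_entities_py : Prop := ∀ (spans : List (List Int)) (entities : List (List Int)), Dom_shift_entities_py spans entities → Pre_shift_entities_py spans entities → Spec_shift_entities_py spans entities (shift_entities_py spans entities)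

-- ===== LEMMAS AND PROOFS =====

-- the total adjustment A subtracts from a coordinate c
def pvT (spans : List (List Int)) (c : Int) : Int :=
  (spans.map (fun s => if PySem.List.pyGetD s 1 0 ≤ c
      then PySem.List.pyGetD s 1 0 - PySem.List.pyGetD s 0 0 - 1 else 0)).sum

-- A's inner-loop body as a pure row update
def pvU (span ent row : List Int) : List Int :=
  let span_len := PySem.List.pyGetD span 1 0 - PySem.List.pyGetD span 0 0
  let r1 := if PySem.List.pyGetD span 1 0 ≤ PySem.List.pyGetD ent 0 0 then
      row.set 0 (row.getD 0 0 - (span_len - 1)) else row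
  if PySem.List.pyGetD span 1 0 ≤ PySem.List.pyGetD ent 1 0 then
      r1.set 1 (r1.getD 1 0 - (span_len - 1)) else r1

lemma pv_getD_append_cons {α : Type} (pre : List α) (x : α) (t : List α) (d : α) :
    (pre ++ x :: t).getD pre.length d = x := by
  induction pre with
  | nil => rfl
  | cons a pre ih => simp [ih]

lemma pv_set_append_cons {α : Type} (pre : List α) (x y : α) (t : List α) :
    (pre ++ x :: t).set pre.length y = pre ++ y :: t := by
  induction pre with
  | nil => rfl
  | cons a pre ih => simp [ih]

lemma pv_aStep_eq (span : List Int) (pre : List (List Int)) (row : List Int)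
    (tail : List (List Int)) (ent : List Int) :
    pvAStep span (pre ++ row :: tail) ((pre.length : Int), ent)
      = pre ++ (pvU span ent row) :: tail := by
  unfold pvAStep pvU
  simp only [Int.toNat_natCast, pv_getD_append_cons, pv_set_append_cons]
  split_ifs <;> simp

lemma pv_inner_spec (span : List Int) :
    ∀ (es pre : List (List Int)) (g : List Int → List Int),
    (PySem.List.enumerate es (pre.length : Int)).foldl (pvAStep span) (pre ++ es.map g)
      = pre ++ es.map (fun e => pvU span e (g e)) := by
  intro es
  induction es with
  | nil => intro pre g; simp [PySem.List.enumerate_nil]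
  | cons e tl ih =>
    intro pre g
    rw [PySem.List.enumerate_cons]
    simp only [List.map_cons, List.foldl_cons]
    rw [pv_aStep_eq]
    have h1 : ((pre.length : Int) + 1) = (((pre ++ [pvU span e (g e)]).length : Nat) : Int) := by
      simp
    have h2 : pre ++ pvU span e (g e) :: tl.map g
        = (pre ++ [pvU span e (g e)]) ++ tl.map g := by simp
    rw [h1, h2, ih]
    simp

lemma pv_inner_spec0 (span : List Int) (es : List (List Int)) (g : List Int → List Int) :
    (PySem.List.enumerate es 0).foldl (pvAStep span) (es.map g)
      = es.map (fun e => pvU span e (g e)) := by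
  simpa using pv_inner_spec span es [] g

lemma pv_outer_spec :
    ∀ (spans : List (List Int)) (entities : List (List Int)) (g : List Int → List Int),
    spans.foldl (fun st span => (PySem.List.enumerate entities 0).foldl (pvAStep span) st)
        (entities.map g)
      = entities.map (fun e => spans.foldl (fun row span => pvU span e row) (g e)) := by
  intro spans
  induction spans with
  | nil => intro entities g; simp
  | cons s rest ih =>
    intro entities g
    simp only [List.foldl_cons]
    rw [pv_inner_spec0 s entities g, ih entities (fun e => pvU s e (g e))]

lemma pv_fold_u (a b : Int) (r : List Int) :
    ∀ (spans : List (List Int)) (x y : Int),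
    spans.foldl (fun row span => pvU span (a :: b :: r) row) (x :: y :: r)
      = (x - pvT spans a) :: (y - pvT spans b) :: r := by
  intro spans
  induction spans with
  | nil => intro x y; simp [pvT]
  | cons s rest ih =>
    intro x y
    simp only [List.foldl_cons]
    have hu : pvU s (a :: b :: r) (x :: y :: r)
        = (if PySem.List.pyGetD s 1 0 ≤ a then
             x - (PySem.List.pyGetD s 1 0 - PySem.List.pyGetD s 0 0 - 1) else x)
          :: (if PySem.List.pyGetD s 1 0 ≤ b then
             y - (PySem.List.pyGetD s 1 0 - PySem.List.pyGetD s 0 0 - 1) else y) :: r := by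
      unfold pvU
      simp only [PySem.List.pyGetD_ofNat', List.getD_cons_zero, List.getD_cons_succ,
        List.set_cons_zero]
      split_ifs <;> rfl
    rw [hu, ih]
    unfold pvT
    simp only [List.map_cons, List.sum_cons]
    split_ifs <;> congr 1 <;> ring

-- characterization of A
lemma pvA_char (spans : List (List Int)) (entities : List (List Int))
    (he : ∀ e ∈ entities, 2 ≤ e.length) :
    shift_entities_py spans entities
      = entities.map (fun e =>
          (PySem.List.pyGetD e 0 0 - pvT spans (PySem.List.pyGetD e 0 0))
          :: (PySem.List.pyGetD e 1 0 - pvT spans (PySem.List.pyGetD e 1 0))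
          :: e.drop 2) := by
  unfold shift_entities_py
  rw [pv_outer_spec spans entities (fun x => x)]
  apply List.map_congr_left
  intro e hmem
  have h2 := he e hmem
  match e, h2 with
  | a :: b :: r, _ =>
    rw [pv_fold_u a b r spans a b]
    simp [PySem.List.pyGetD_ofNat']

-- ===== B side =====

lemma pv_bsearch_spec (ends : List Int) (c : Int)
    (hmono : ∀ i j (hi : i < ends.length) (hj : j < ends.length), i ≤ j → ends[i] ≤ ends[j]) :
    ∀ (n lo hi : Nat), hi - lo ≤ n → lo ≤ hi → hi ≤ ends.length →
    (∀ j (h : j < ends.length), j < lo → ends[j] ≤ c) →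
    (∀ j (h : j < ends.length), hi ≤ j → c < ends[j]) →
    (pvBSearch ends c n lo hi ≤ ends.length
      ∧ (∀ j (h : j < ends.length), j < pvBSearch ends c n lo hi → ends[j] ≤ c)
      ∧ (∀ j (h : j < ends.length), pvBSearch ends c n lo hi ≤ j → c < ends[j])) := by
  intro n
  induction n with
  | zero =>
    intro lo hi hn hle hlen hlow hhigh
    have heq : lo = hi := by omega
    simp only [pvBSearch]
    exact ⟨by omega, hlow, fun j h hj => hhigh j h (by omega)⟩
  | succ n ih =>
    intro lo hi hn hle hlen hlow hhigh
    by_cases hlh : lo < hi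
    · rw [pvBSearch]
      simp only [if_pos hlh]
      have hmidlt : (lo + hi) / 2 < hi := by omega
      have hmidge : lo ≤ (lo + hi) / 2 := by omega
      have hmlen : (lo + hi) / 2 < ends.length := by omega
      have hget : PySem.List.pyGetD ends (((lo + hi) / 2 : Nat) : Int) 0
          = ends[(lo + hi) / 2] := by
        rw [PySem.List.pyGetD_natCast, List.getD_eq_getElem ends 0 hmlen]
      by_cases hcc : PySem.List.pyGetD ends (((lo + hi) / 2 : Nat) : Int) 0 ≤ c
      · simp only [if_pos hcc]
        refine ih ((lo + hi) / 2 + 1) hi (by omega) (by omega) hlen ?_ hhigh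
        intro j h hj
        rcases Nat.lt_or_ge j lo with hj2 | hj2
        · exact hlow j h hj2
        · calc ends[j] ≤ ends[(lo + hi) / 2] := hmono j _ h hmlen (by omega)
            _ ≤ c := by rw [← hget]; exact hcc
      · simp only [if_neg hcc]
        refine ih lo ((lo + hi) / 2) (by omega) (by omega) (by omega) hlow ?_
        intro j h hj
        calc c < ends[(lo + hi) / 2] := by rw [← hget]; omega
          _ ≤ ends[j] := hmono _ j hmlen h hj
    · rw [pvBSearch]
      simp only [if_neg hlh]
      exact ⟨by omega, hlow, fun j h hj => hhigh j h (by omega)⟩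

lemma pv_pref_fold :
    ∀ (q : List (Int × Int)) (pr0 : List Int) (t0 : Int),
    q.foldl (fun (st : List Int × Int) p => (st.1 ++ [st.2 + p.2], st.2 + p.2)) (pr0, t0)
      = (pr0 ++ (List.range q.length).map (fun k => t0 + ((q.take (k + 1)).map (fun p => p.2)).sum),
         t0 + (q.map (fun p => p.2)).sum) := by
  intro q
  induction q with
  | nil => intro pr0 t0; simp
  | cons p q ih =>
    intro pr0 t0
    simp only [List.foldl_cons]
    rw [ih]
    simp only [Prod.mk.injEq]
    constructor
    · rw [List.length_cons, List.range_succ_eq_map, List.map_cons, List.map_map,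
        List.append_assoc, List.singleton_append]
      refine congrArg (pr0 ++ ·) ?_
      refine List.cons_eq_cons.mpr ⟨by simp, List.map_congr_left ?_⟩
      intro k _
      simp only [Function.comp_apply, List.take_succ_cons, List.map_cons, List.sum_cons]
      ring
    · simp only [List.map_cons, List.sum_cons]; ring

lemma pv_pref_getD (q : List (Int × Int)) (lo : Nat) (hlo : lo ≤ q.length) :
    PySem.List.pyGetD
      (q.foldl (fun (st : List Int × Int) p => (st.1 ++ [st.2 + p.2], st.2 + p.2)) ([0], 0)).1
      ((lo : Nat) : Int) 0
      = ((q.take lo).map (fun p => p.2)).sum := by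
  rw [pv_pref_fold, PySem.List.pyGetD_natCast]
  cases lo with
  | zero => simp
  | succ k =>
    simp only [List.singleton_append, List.getD_cons_succ]
    have hk : k < (List.range q.length).length := by simp; omega
    rw [List.getD_eq_getElem _ 0 (by simpa using by omega : k < ((List.range q.length).map _).length)]
    simp [List.getElem_map, List.getElem_range]

-- B's total(c) equals the total adjustment pvT spans c
lemma pvB_total (spans : List (List Int)) (c : Int) :
    pvTotal
      ((PySem.List.sorted
          (spans.map (fun s => (PySem.List.pyGetD s 1 0,
              PySem.List.pyGetD s 1 0 - PySem.List.pyGetD s 0 0 - 1)))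
          (fun p => p.1) false).map (fun p => p.1))
      ((PySem.List.sorted
          (spans.map (fun s => (PySem.List.pyGetD s 1 0,
              PySem.List.pyGetD s 1 0 - PySem.List.pyGetD s 0 0 - 1)))
          (fun p => p.1) false).foldl
        (fun (st : List Int × Int) p => (st.1 ++ [st.2 + p.2], st.2 + p.2)) ([0], 0)).1 c
      = pvT spans c := by
  set q := PySem.List.sorted
      (spans.map (fun s => (PySem.List.pyGetD s 1 0,
          PySem.List.pyGetD s 1 0 - PySem.List.pyGetD s 0 0 - 1)))
      (fun p => p.1) false with hq
  have hperm : q.Perm (spans.map (fun s => (PySem.List.pyGetD s 1 0,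
      PySem.List.pyGetD s 1 0 - PySem.List.pyGetD s 0 0 - 1))) :=
    PySem.List.sorted_perm _ _ _
  have hpw : List.Pairwise (fun a b => a.1 ≤ b.1) q := PySem.List.sorted_pairwise _ _
  have hmono : ∀ i j (hi : i < (q.map (fun p => p.1)).length)
      (hj : j < (q.map (fun p => p.1)).length), i ≤ j →
      (q.map (fun p => p.1))[i] ≤ (q.map (fun p => p.1))[j] := by
    intro i j hi hj hij
    simp only [List.getElem_map]
    rcases Nat.eq_or_lt_of_le hij with rfl | hlt
    · exact le_refl _
    · exact (List.pairwise_iff_getElem.mp hpw) i j (by simpa using hi) (by simpa using hj) hlt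
  have hlen : (q.map (fun p => p.1)).length = q.length := by simp
  set r := pvBSearch (q.map (fun p => p.1)) c (q.map (fun p => p.1)).length 0
      (q.map (fun p => p.1)).length with hr
  obtain ⟨hrle, htake, hdrop⟩ := pv_bsearch_spec (q.map (fun p => p.1)) c hmono
    (q.map (fun p => p.1)).length 0 (q.map (fun p => p.1)).length
    (by omega) (by omega) (le_refl _)
    (fun j h hj => absurd hj (by omega))
    (fun j h hj => absurd h (by omega))
  unfold pvTotal
  rw [← hr]
  have hrq : r ≤ q.length := by omega
  rw [pv_pref_getD q r hrq]
  have hTq : pvT spans c = (q.map (fun p => if p.1 ≤ c then p.2 else 0)).sum := by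
    unfold pvT
    rw [(hperm.map (fun p => if p.1 ≤ c then p.2 else 0)).sum_eq, List.map_map]
    rfl
  have hsplit : (q.map (fun p => if p.1 ≤ c then p.2 else 0)).sum
      = ((q.take r).map (fun p => if p.1 ≤ c then p.2 else 0)).sum
        + ((q.drop r).map (fun p => if p.1 ≤ c then p.2 else 0)).sum := by
    conv_lhs => rw [← List.take_append_drop r q]
    rw [List.map_append, List.sum_append]
  have h1 : (q.take r).map (fun p => if p.1 ≤ c then p.2 else 0)
      = (q.take r).map (fun p => p.2) := by
    apply List.map_congr_left
    intro p hp
    obtain ⟨j, hj, rfl⟩ := List.mem_iff_getElem.mp hp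
    have hjr : j < r := by simp [List.length_take] at hj; omega
    have hjq : j < q.length := by simp [List.length_take] at hj; omega
    have hle := htake j (by simpa using hjq) (by omega)
    simp only [List.getElem_map] at hle
    simp [List.getElem_take, hle]
  have h2 : ((q.drop r).map (fun p => if p.1 ≤ c then p.2 else 0)).sum = 0 := by
    apply List.sum_eq_zero
    intro x hx
    obtain ⟨p, hp, rfl⟩ := List.mem_map.mp hx
    obtain ⟨j, hj, rfl⟩ := List.mem_iff_getElem.mp hp
    have hlq : r + j < q.length := by simp [List.length_drop] at hj; omega
    have hgt := hdrop (r + j) (by simpa using hlq) (by omega)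
    simp only [List.getElem_map] at hgt
    simp [List.getElem_drop, if_neg (not_le.mpr hgt)]
  rw [hTq, hsplit, h1, h2, add_zero]

-- ===== VERDICT (by name: the statement is the Claim_ definition above) =====
-- ===== VERDICT (by name: the statement is the Claim_ definition above) =====
theorem shift_entities_py_spec : Claim_equal_shift_entities_py := by
  intro spans entities _hdom hpre
  unfold Spec_shift_entities_py
  rw [pvA_char spans entities hpre.2]
  unfold shift_entities_py_alt
  simp only
  apply List.map_congr_left
  intro e hmem
  have h2 := hpre.2 e hmem
  rw [pvB_total spans, pvB_total spans]
  match e, h2 with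
  | a :: b :: r, _ =>
    simp [PySem.List.pyGetD_ofNat', PySem.List.slice_from _ (by norm_num : (0:Int) ≤ 2)]
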